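-- pv_equiv track=rewrite | github.com/MichaelYin1994/python-style-guide | examples/kpi-anomaly-detection/src/test/test_stream_processing.py | compute_window_range_count
-- ===== SOURCE A (Python) =====
-- def compute_window_range_count(timestamp, sensor_vals,
--                                start, end, low, high,
--                                low_count, high_count, max_time_span):
--     # 时间窗口放缩，统计量修正
--     window_low_count_delta = 0
--     window_high_count_delta = 0
--     time_gap = timestamp[end] - timestamp[start]
--
--     if sensor_vals[end] > high:
--         high_count += 1
--     elif sensor_vals[end] < low:
--         low_count += 1
--
--     if time_gap > max_time_span:
--         while(start <= end and time_gap > max_time_span):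
--             if sensor_vals[start] > high:
--                 window_high_count_delta -= 1
--             elif sensor_vals[start] < low:
--                 window_low_count_delta -= 1
--             start += 1
--             time_gap = timestamp[end] - timestamp[start]
--
--     # 统计量更新
--     dist2end = end - start + 1
--     low_count = low_count + window_low_count_delta
--     high_count = high_count + window_high_count_delta
--
--     return dist2end, low_count, high_count
-- ===== SOURCE B (Python) =====
-- def compute_window_range_count(timestamp, sensor_vals,
--                                start, end, low, high,
--                                low_count, high_count, max_time_span):
--     # Bump counts for the newly arrived element.
--     if sensor_vals[end] > high:
--         high_count += 1
--     elif sensor_vals[end] < low: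
--         low_count += 1
--
--     # Single backward pass over the whole window: accumulate suffix counts of
--     # out-of-range values, and snapshot them at every index whose time gap to
--     # the end fits; the last snapshot taken belongs to the smallest fitting
--     # index, which is the new window start.
--     h = l = 0
--     boundary = None
--     for i in range(end, start - 1, -1):
--         if sensor_vals[i] > high:
--             h += 1
--         elif sensor_vals[i] < low:
--             l += 1
--         if timestamp[end] - timestamp[i] <= max_time_span:
--             boundary = (i, h, l)
--
--     if boundary is None:
--         new_start, kept_h, kept_l = start, h, l
--     else:
--         new_start, kept_h, kept_l = boundary
--
--     # Dropped elements = window totals minus the suffix kept at the boundary.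
--     return (end - new_start + 1,
--             low_count - (l - kept_l),
--             high_count - (h - kept_h))
-- ===== Notes on version B (the rewrite author's own statement) =====
-- stated objective: alternative
-- what changed: B replaces A's forward fused shrink loop (advance start while the gap is too large, decrementing delta counters) by a single BACKWARD pass over the whole window that accumulates suffix counts of out-of-range values and snapshots them at every index whose gap fits; the last snapshot is the new start, and the dropped counts fall out as window totals minus the snapshotted suffix counts.
-- outside the precondition, e.g. on compute_window_range_count([0, 9, 10], [9, 9, 9], 0, 1, 2, 4, 0, 0, -1): A returns (0, 0, -1), B returns (2, 0, 1); on compute_window_range_count([0, 1, 2], [5], -2, -1, 0, 10, 0, 0, 5): A returns (2, 0, 0), B raises IndexError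
import Mathlib
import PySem

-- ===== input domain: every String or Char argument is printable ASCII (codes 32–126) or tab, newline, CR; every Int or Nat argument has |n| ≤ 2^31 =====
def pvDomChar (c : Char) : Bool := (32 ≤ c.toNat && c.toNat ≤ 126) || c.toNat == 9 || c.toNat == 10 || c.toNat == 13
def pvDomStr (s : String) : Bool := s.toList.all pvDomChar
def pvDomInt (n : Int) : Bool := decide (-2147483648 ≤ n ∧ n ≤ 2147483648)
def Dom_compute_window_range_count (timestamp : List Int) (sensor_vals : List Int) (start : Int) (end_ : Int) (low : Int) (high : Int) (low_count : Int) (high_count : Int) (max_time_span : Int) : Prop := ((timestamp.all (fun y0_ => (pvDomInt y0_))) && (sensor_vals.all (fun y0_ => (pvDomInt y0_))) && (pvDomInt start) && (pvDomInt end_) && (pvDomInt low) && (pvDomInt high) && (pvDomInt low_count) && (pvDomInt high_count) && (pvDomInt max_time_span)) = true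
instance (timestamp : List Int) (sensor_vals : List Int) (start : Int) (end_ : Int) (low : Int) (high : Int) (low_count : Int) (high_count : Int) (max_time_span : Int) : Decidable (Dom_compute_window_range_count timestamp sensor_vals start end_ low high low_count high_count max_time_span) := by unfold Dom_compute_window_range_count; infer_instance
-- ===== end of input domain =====

-- B replaces A's forward shrink loop (which only walks the dropped prefix, decrementing deltas)
-- by ONE backward pass over the whole window that accumulates suffix counts and snapshots them
-- at every fitting index; return-value equivalence proved on Pre_ (valid window, 0 ≤ max_time_span).

-- ===== PORT A =====
-- A's while loop: advances `start`, accumulating the two (negative) deltas, exactly as in the Python.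
def aLoop (timestamp sensor_vals : List Int) (end_ low high max_time_span : Int)
    (start lcd hcd : Int) : Int × Int × Int :=
  if h : start ≤ end_ ∧ PySem.List.pyGetD timestamp end_ 0 - PySem.List.pyGetD timestamp start 0 > max_time_span then
    let v := PySem.List.pyGetD sensor_vals start 0
    let hcd' := if v > high then hcd - 1 else hcd
    let lcd' := if v > high then lcd else if v < low then lcd - 1 else lcd
    aLoop timestamp sensor_vals end_ low high max_time_span (start + 1) lcd' hcd'
  else
    (start, lcd, hcd)
termination_by (end_ + 1 - start).toNat
decreasing_by omega

def compute_window_range_count (timestamp : List Int) (sensor_vals : List Int) (start : Int) (end_ : Int) (low : Int) (high : Int) (low_count : Int) (high_count : Int) (max_time_span : Int) : Int × Int × Int :=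
  let time_gap := PySem.List.pyGetD timestamp end_ 0 - PySem.List.pyGetD timestamp start 0
  let ev := PySem.List.pyGetD sensor_vals end_ 0
  let high_count := if ev > high then high_count + 1 else high_count
  let low_count := if ev > high then low_count else if ev < low then low_count + 1 else low_count
  let r := if time_gap > max_time_span then
             aLoop timestamp sensor_vals end_ low high max_time_span start 0 0
           else (start, 0, 0)
  (end_ - r.1 + 1, low_count + r.2.1, high_count + r.2.2)

-- ===== PORT B =====
-- Source B's loop body: bump the suffix counts (h, l) at index i, and snapshot (i, h, l) when the gap fits.
def bStep (timestamp sensor_vals : List Int) (end_ low high max_time_span : Int)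
    (st : Int × Int × Option (Int × Int × Int)) (i : Int) : Int × Int × Option (Int × Int × Int) :=
  let v := PySem.List.pyGetD sensor_vals i 0
  let h := if v > high then st.1 + 1 else st.1
  let l := if v > high then st.2.1 else if v < low then st.2.1 + 1 else st.2.1
  let b := if PySem.List.pyGetD timestamp end_ 0 - PySem.List.pyGetD timestamp i 0 ≤ max_time_span
           then some (i, h, l) else st.2.2
  (h, l, b)

def compute_window_range_count_alt (timestamp : List Int) (sensor_vals : List Int) (start : Int) (end_ : Int) (low : Int) (high : Int) (low_count : Int) (high_count : Int) (max_time_span : Int) : Int × Int × Int :=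
  let ev := PySem.List.pyGetD sensor_vals end_ 0
  let high_count := if ev > high then high_count + 1 else high_count
  let low_count := if ev > high then low_count else if ev < low then low_count + 1 else low_count
  -- for i in range(end, start - 1, -1): …
  let r := (PySem.List.pyRange end_ (start - 1) (-1)).foldl
             (bStep timestamp sensor_vals end_ low high max_time_span) (0, 0, none)
  let nkk : Int × Int × Int :=
    match r.2.2 with
    | none => (start, r.1, r.2.1)
    | some b => b
  (end_ - nkk.1 + 1, low_count - (r.2.1 - nkk.2.2), high_count - (r.1 - nkk.2.1))

-- ===== PRECONDITION & SPEC =====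
-- Pre_ is the natural domain: a window start ≤ end_ whose indices (including Python's negative
-- in-range indices, which both programs resolve alike) are valid for both lists, and a non-negative
-- max_time_span. Outside it A raises IndexError, returns a value shaped by the loop reading past
-- end_ when max_time_span < 0 (an accident of A's implementation), or — on mismatched-length lists
-- where A happens to touch only valid indices — B itself raises (see cites).
def Pre_compute_window_range_count (timestamp : List Int) (sensor_vals : List Int) (start : Int) (end_ : Int) (low : Int) (high : Int) (low_count : Int) (high_count : Int) (max_time_span : Int) : Prop :=
  (if start ≤ end_ then
      -((min timestamp.length sensor_vals.length : Nat) : Int) ≤ start ∧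
      end_ < ((min timestamp.length sensor_vals.length : Nat) : Int)
    else
      PySem.Raise.InRange timestamp.length start ∧ PySem.Raise.InRange timestamp.length end_ ∧
      PySem.Raise.InRange sensor_vals.length end_) ∧
  0 ≤ max_time_span
instance (timestamp : List Int) (sensor_vals : List Int) (start : Int) (end_ : Int) (low : Int) (high : Int) (low_count : Int) (high_count : Int) (max_time_span : Int) : Decidable (Pre_compute_window_range_count timestamp sensor_vals start end_ low high low_count high_count max_time_span) := by unfold Pre_compute_window_range_count; infer_instance

def pvWitness_compute_window_range_count : List Int × List Int × Int × Int × Int × Int × Int × Int × Int :=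
  ([0, 1, 5], [7, 1, 9], 0, 2, 2, 4, 0, 0, 3)

def Spec_compute_window_range_count (timestamp : List Int) (sensor_vals : List Int) (start : Int) (end_ : Int) (low : Int) (high : Int) (low_count : Int) (high_count : Int) (max_time_span : Int) (out : Int × Int × Int) : Prop := out = compute_window_range_count_alt timestamp sensor_vals start end_ low high low_count high_count max_time_span
instance (timestamp : List Int) (sensor_vals : List Int) (start : Int) (end_ : Int) (low : Int) (high : Int) (low_count : Int) (high_count : Int) (max_time_span : Int) (out : Int × Int × Int) : Decidable (Spec_compute_window_range_count timestamp sensor_vals start end_ low high low_count high_count max_time_span out) := by unfold Spec_compute_window_range_count; infer_instance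

-- ===== CLAIM =====
def Claim_equal_compute_window_range_count : Prop := ∀ (timestamp : List Int) (sensor_vals : List Int) (start : Int) (end_ : Int) (low : Int) (high : Int) (low_count : Int) (high_count : Int) (max_time_span : Int), Dom_compute_window_range_count timestamp sensor_vals start end_ low high low_count high_count max_time_span → Pre_compute_window_range_count timestamp sensor_vals start end_ low high low_count high_count max_time_span → Spec_compute_window_range_count timestamp sensor_vals start end_ low high low_count high_count max_time_span (compute_window_range_count timestamp sensor_vals start end_ low high low_count high_count max_time_span)

-- ===== LEMMAS AND PROOFS =====

-- proof-only abstractions: first index in [a, b] whose gap to end_ fits, and counts over [a, b)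
def pvFind (timestamp : List Int) (end_ a b mts : Int) : Option Int :=
  (PySem.List.pyRange a (b + 1) 1).find?
    (fun s => decide (PySem.List.pyGetD timestamp end_ 0 - PySem.List.pyGetD timestamp s 0 ≤ mts))

def pvCnt (a b : Int) (p : Int → Bool) : Int :=
  (((PySem.List.pyRange a b 1).filter p).length : Int)

-- abbreviations for the two value predicates
def pH (sensor_vals : List Int) (high : Int) (i : Int) : Bool :=
  decide (PySem.List.pyGetD sensor_vals i 0 > high)
def pL (sensor_vals : List Int) (low high : Int) (i : Int) : Bool :=
  decide (PySem.List.pyGetD sensor_vals i 0 ≤ high ∧ PySem.List.pyGetD sensor_vals i 0 < low)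

lemma pvFind_mem (timestamp : List Int) (end_ a b mts x : Int)
    (h : pvFind timestamp end_ a b mts = some x) : a ≤ x ∧ x ≤ b := by
  have hx := List.mem_of_find?_eq_some h
  rw [PySem.List.mem_pyRange_one] at hx
  omega

lemma pvFind_nil (timestamp : List Int) (end_ a b mts : Int) (h : b < a) :
    pvFind timestamp end_ a b mts = none := by
  unfold pvFind
  rw [PySem.List.pyRange_one_eq_nil (by omega)]
  rfl

lemma pvFind_hit_end (timestamp : List Int) (end_ a mts : Int) (ha : a ≤ end_) (hmts : 0 ≤ mts) :
    (pvFind timestamp end_ a end_ mts).isSome := by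
  cases hf : pvFind timestamp end_ a end_ mts with
  | some x => rfl
  | none =>
      exfalso
      unfold pvFind at hf
      have hmem : end_ ∈ PySem.List.pyRange a (end_ + 1) 1 := by
        rw [PySem.List.mem_pyRange_one]; omega
      have := List.find?_eq_none.mp hf end_ hmem
      simp at this
      omega

lemma pvFind_snoc (timestamp : List Int) (end_ a b mts : Int) (h : a ≤ b) :
    pvFind timestamp end_ a b mts =
      (pvFind timestamp end_ a (b - 1) mts).or
        (if PySem.List.pyGetD timestamp end_ 0 - PySem.List.pyGetD timestamp b 0 ≤ mts
         then some b else none) := by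
  unfold pvFind
  rw [PySem.List.pyRange_one_succ_right (by omega : a ≤ b), List.find?_append]
  have : b - 1 + 1 = b := by omega
  rw [this]
  by_cases hp : PySem.List.pyGetD timestamp end_ 0 - PySem.List.pyGetD timestamp b 0 ≤ mts <;>
    simp [List.find?, hp]

lemma pvCnt_nil (a : Int) (p : Int → Bool) : pvCnt a a p = 0 := by
  unfold pvCnt; rw [PySem.List.pyRange_one_eq_nil le_rfl]; rfl

lemma pvCnt_snoc (a b : Int) (p : Int → Bool) (h : a ≤ b) :
    pvCnt a (b + 1) p = pvCnt a b p + (if p b then 1 else 0) := by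
  unfold pvCnt
  rw [PySem.List.pyRange_one_succ_right h, List.filter_append]
  by_cases hp : p b <;> simp [hp]

lemma pvCnt_cons (a b : Int) (p : Int → Bool) (h : a < b) :
    pvCnt a b p = (if p a then 1 else 0) + pvCnt (a + 1) b p := by
  unfold pvCnt
  rw [PySem.List.pyRange_one_cons h]
  by_cases hp : p a <;> simp [List.filter, hp] <;> omega

lemma pvCnt_split (a b c : Int) (p : Int → Bool) (h1 : a ≤ b) (h2 : b ≤ c) :
    pvCnt a c p = pvCnt a b p + pvCnt b c p := by
  unfold pvCnt
  rw [PySem.List.pyRange_one_append a b c h1 h2, List.filter_append]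
  simp

-- B's fold characterised: after folding the countdown range from j down to start,
-- the state holds the totals over [start, j] and the snapshot at the first fitting index.
lemma bFold_char (timestamp sensor_vals : List Int) (end_ low high mts start : Int) :
    ∀ (j : Int), start - 1 ≤ j → ∀ (h0 l0 : Int) (ns0 : Option (Int × Int × Int)),
      (PySem.List.pyRange j (start - 1) (-1)).foldl
          (bStep timestamp sensor_vals end_ low high mts) (h0, l0, ns0) =
        (h0 + pvCnt start (j + 1) (pH sensor_vals high),
         l0 + pvCnt start (j + 1) (pL sensor_vals low high),
         match pvFind timestamp end_ start j mts with
         | some i => some (i, h0 + pvCnt i (j + 1) (pH sensor_vals high),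
                              l0 + pvCnt i (j + 1) (pL sensor_vals low high))
         | none => ns0) := by
  intro j
  induction hn : (j - (start - 1)).toNat using Nat.strong_induction_on generalizing j with
  | _ n ih =>
    intro hj h0 l0 ns0
    by_cases hjs : j = start - 1
    · subst hjs
      rw [PySem.List.pyRange_neg_one_eq_nil le_rfl]
      have h1 : start - 1 + 1 = start := by omega
      rw [List.foldl_nil, h1, pvCnt_nil, pvCnt_nil,
          pvFind_nil timestamp end_ start (start - 1) mts (by omega)]
      simp
    · have hlt : start - 1 < j := by omega
      rw [PySem.List.pyRange_neg_one_cons hlt, List.foldl_cons]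
      have hrec := ih (j - 1 - (start - 1)).toNat (by omega) (j - 1) rfl (by omega)
        (if PySem.List.pyGetD sensor_vals j 0 > high then h0 + 1 else h0)
        (if PySem.List.pyGetD sensor_vals j 0 > high then l0
         else if PySem.List.pyGetD sensor_vals j 0 < low then l0 + 1 else l0)
        (if PySem.List.pyGetD timestamp end_ 0 - PySem.List.pyGetD timestamp j 0 ≤ mts
         then some (j, (if PySem.List.pyGetD sensor_vals j 0 > high then h0 + 1 else h0),
                       (if PySem.List.pyGetD sensor_vals j 0 > high then l0
                        else if PySem.List.pyGetD sensor_vals j 0 < low then l0 + 1 else l0))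
         else ns0)
      have hstep : bStep timestamp sensor_vals end_ low high mts (h0, l0, ns0) j =
        ((if PySem.List.pyGetD sensor_vals j 0 > high then h0 + 1 else h0),
         (if PySem.List.pyGetD sensor_vals j 0 > high then l0
          else if PySem.List.pyGetD sensor_vals j 0 < low then l0 + 1 else l0),
         (if PySem.List.pyGetD timestamp end_ 0 - PySem.List.pyGetD timestamp j 0 ≤ mts
          then some (j, (if PySem.List.pyGetD sensor_vals j 0 > high then h0 + 1 else h0),
                        (if PySem.List.pyGetD sensor_vals j 0 > high then l0
                         else if PySem.List.pyGetD sensor_vals j 0 < low then l0 + 1 else l0))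
          else ns0)) := rfl
      rw [hstep, hrec]
      have hjj : j - 1 + 1 = j := by omega
      rw [hjj]
      have hsj : start ≤ j := by omega
      rw [pvFind_snoc timestamp end_ start j mts hsj]
      -- resolve the value ifs once
      have hH0 : ∀ a : Int, a ≤ j → pvCnt a (j + 1) (pH sensor_vals high) =
          pvCnt a j (pH sensor_vals high) +
            (if PySem.List.pyGetD sensor_vals j 0 > high then 1 else 0) := by
        intro a ha
        rw [pvCnt_snoc a j _ ha]
        by_cases hv : PySem.List.pyGetD sensor_vals j 0 > high <;> simp [pH, hv]
      have hL0 : ∀ a : Int, a ≤ j → pvCnt a (j + 1) (pL sensor_vals low high) =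
          pvCnt a j (pL sensor_vals low high) +
            (if PySem.List.pyGetD sensor_vals j 0 > high then 0
             else if PySem.List.pyGetD sensor_vals j 0 < low then 1 else 0) := by
        intro a ha
        rw [pvCnt_snoc a j _ ha]
        by_cases hv : PySem.List.pyGetD sensor_vals j 0 > high
        · simp [pL, hv]
        · by_cases hv2 : PySem.List.pyGetD sensor_vals j 0 < low <;>
            simp [pL, hv, hv2, not_lt.mp hv]
      cases hf : pvFind timestamp end_ start (j - 1) mts with
      | some i =>
          have hi := pvFind_mem timestamp end_ start (j - 1) mts i hf
          simp only [Option.some_or]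
          rw [hH0 start hsj, hL0 start hsj, hH0 i (by omega), hL0 i (by omega)]
          simp only [Prod.mk.injEq, Option.some.injEq]
          refine ⟨?_, ?_, trivial, ?_, ?_⟩ <;> (split_ifs <;> omega)
      | none =>
          by_cases hfit : PySem.List.pyGetD timestamp end_ 0 - PySem.List.pyGetD timestamp j 0 ≤ mts
          · simp only [hfit, if_true, Option.none_or]
            rw [hH0 start hsj, hL0 start hsj, hH0 j le_rfl, hL0 j le_rfl, pvCnt_nil, pvCnt_nil]
            simp only [Prod.mk.injEq, Option.some.injEq]
            refine ⟨?_, ?_, trivial, ?_, ?_⟩ <;> (split_ifs <;> omega)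
          · simp only [hfit, if_false, Option.none_or]
            rw [hH0 start hsj, hL0 start hsj]
            simp only [Prod.mk.injEq]
            refine ⟨?_, ?_, trivial⟩ <;> (split_ifs <;> omega)

-- A's fused loop equals the boundary search plus the two counts.
lemma aLoop_eq (timestamp sensor_vals : List Int) (end_ low high max_time_span : Int)
    (hmts : 0 ≤ max_time_span) :
    ∀ (start lcd hcd : Int), start ≤ end_ →
      aLoop timestamp sensor_vals end_ low high max_time_span start lcd hcd =
        ((pvFind timestamp end_ start end_ max_time_span).getD start,
         lcd - pvCnt start ((pvFind timestamp end_ start end_ max_time_span).getD start) (pL sensor_vals low high),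
         hcd - pvCnt start ((pvFind timestamp end_ start end_ max_time_span).getD start) (pH sensor_vals high)) := by
  intro start
  induction hn : (end_ + 1 - start).toNat using Nat.strong_induction_on generalizing start with
  | _ n ih =>
    intro lcd hcd hle
    by_cases hp : PySem.List.pyGetD timestamp end_ 0 - PySem.List.pyGetD timestamp start 0 ≤ max_time_span
    · rw [aLoop]
      have hns : pvFind timestamp end_ start end_ max_time_span = some start := by
        unfold pvFind
        rw [PySem.List.pyRange_one_cons (by omega : start < end_ + 1)]
        simp [List.find?, hp]
      rw [hns]
      simp [pvCnt_nil, not_lt.mpr hp]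
    · have hne : start ≠ end_ := by intro he; subst he; omega
      have hlt : start < end_ := lt_of_le_of_ne hle hne
      have hns : pvFind timestamp end_ start end_ max_time_span =
          pvFind timestamp end_ (start + 1) end_ max_time_span := by
        unfold pvFind
        rw [PySem.List.pyRange_one_cons (by omega : start < end_ + 1), List.find?]
        simp only [hp, decide_false]
      rw [aLoop]
      have hguard : start ≤ end_ ∧ PySem.List.pyGetD timestamp end_ 0 - PySem.List.pyGetD timestamp start 0 > max_time_span := ⟨hle, by omega⟩
      rw [dif_pos hguard]
      have hrec := ih (end_ + 1 - (start + 1)).toNat (by omega) (start + 1) rfl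
        (if PySem.List.pyGetD sensor_vals start 0 > high then lcd
         else if PySem.List.pyGetD sensor_vals start 0 < low then lcd - 1 else lcd)
        (if PySem.List.pyGetD sensor_vals start 0 > high then hcd - 1 else hcd)
        (by omega)
      simp only [] at hrec ⊢
      rw [hrec, hns]
      cases hf : pvFind timestamp end_ (start + 1) end_ max_time_span with
      | none =>
          exfalso
          have := pvFind_hit_end timestamp end_ (start + 1) max_time_span (by omega) hmts
          rw [hf] at this; exact absurd this (by simp)
      | some i =>
          have hi := pvFind_mem timestamp end_ (start + 1) end_ max_time_span i hf
          simp only [Option.getD_some, Prod.mk.injEq]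
          have hcL : pvCnt start i (pL sensor_vals low high) =
              (if PySem.List.pyGetD sensor_vals start 0 > high then 0
               else if PySem.List.pyGetD sensor_vals start 0 < low then 1 else 0) +
                pvCnt (start + 1) i (pL sensor_vals low high) := by
            rw [pvCnt_cons start i _ (by omega)]
            by_cases hv : PySem.List.pyGetD sensor_vals start 0 > high
            · simp [pL, hv]
            · by_cases hv2 : PySem.List.pyGetD sensor_vals start 0 < low <;>
                simp [pL, hv, hv2, not_lt.mp hv]
          have hcH : pvCnt start i (pH sensor_vals high) =
              (if PySem.List.pyGetD sensor_vals start 0 > high then 1 else 0) +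
                pvCnt (start + 1) i (pH sensor_vals high) := by
            rw [pvCnt_cons start i _ (by omega)]
            by_cases hv : PySem.List.pyGetD sensor_vals start 0 > high <;> simp [pH, hv]
          refine ⟨trivial, by rw [hcL]; split_ifs <;> omega, by rw [hcH]; split_ifs <;> omega⟩

-- ===== VERDICT =====
theorem compute_window_range_count_spec : Claim_equal_compute_window_range_count := by
  intro timestamp sensor_vals start end_ low high low_count high_count max_time_span _ hpre
  obtain ⟨-, hmts⟩ := hpre
  unfold Spec_compute_window_range_count compute_window_range_count compute_window_range_count_alt
  simp only []
  by_cases hse : start ≤ end_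
  case neg =>
    -- empty window: A's loop guard is false at once, B's countdown range is empty
    have hA : aLoop timestamp sensor_vals end_ low high max_time_span start 0 0 = (start, 0, 0) := by
      rw [aLoop, dif_neg (by omega)]
    rw [PySem.List.pyRange_neg_one_eq_nil (by omega : end_ ≤ start - 1), List.foldl_nil, hA, ite_self]
    simp
  case pos =>
    have hfold := bFold_char timestamp sensor_vals end_ low high max_time_span start end_
      (by omega) 0 0 none
    cases hf : pvFind timestamp end_ start end_ max_time_span with
    | none =>
        exfalso
        have := pvFind_hit_end timestamp end_ start max_time_span hse hmts
        rw [hf] at this; exact absurd this (by simp)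
    | some i =>
        have hi := pvFind_mem timestamp end_ start end_ max_time_span i hf
        rw [hf] at hfold
        rw [hfold]
        simp only [zero_add]
        have hsplitH := pvCnt_split start i (end_ + 1) (pH sensor_vals high) (by omega) (by omega)
        have hsplitL := pvCnt_split start i (end_ + 1) (pL sensor_vals low high) (by omega) (by omega)
        by_cases hgap : PySem.List.pyGetD timestamp end_ 0 - PySem.List.pyGetD timestamp start 0 > max_time_span
        · rw [if_pos hgap,
            aLoop_eq timestamp sensor_vals end_ low high max_time_span hmts start 0 0 hse, hf]
          simp only [Option.getD_some, Prod.mk.injEq]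
          refine ⟨trivial, by omega, by omega⟩
        · rw [if_neg hgap]
          have his : i = start := by
            have hfs : pvFind timestamp end_ start end_ max_time_span = some start := by
              unfold pvFind
              rw [PySem.List.pyRange_one_cons (by omega : start < end_ + 1)]
              simp [List.find?,
                show PySem.List.pyGetD timestamp end_ 0 - PySem.List.pyGetD timestamp start 0 ≤ max_time_span by omega]
            rw [hf] at hfs
            exact Option.some.inj hfs
          subst his
          simp only [Prod.mk.injEq]
          refine ⟨trivial, by omega, by omega⟩
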